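-- pv_equiv track=rewrite | github.com/ABorrel/ToxCastLib | py/ChemCAS.py | fromatLineChem
-- ===== SOURCE A (Python) =====
-- def fromatLineChem(lineChem):
--
--     # format split \n
--     llineChem = list(lineChem)
--     i = 0
--     imax = len(llineChem)
--     flagopen = 0
--     while i < imax:
--         if llineChem[i] == "\"" and flagopen == 0:
--             flagopen = 1
--         elif llineChem[i] == "\"" and flagopen == 1:
--             flagopen = 0
--
--         if flagopen == 1 and llineChem[i] == "\n":
--             llineChem[i] = " "
--         elif flagopen == 1 and llineChem[i] == ",":
--             llineChem[i] = " "
--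
--         i = i + 1
--
--     lineChem = "".join(llineChem)
--     lineChem = lineChem.replace("\"", "")
--
--     return lineChem
-- ===== SOURCE B (Python) =====
-- def fromatLineChem(lineChem):
--     segs = lineChem.split('"')
--     return ''.join(s.replace('\n', ' ').replace(',', ' ') if i % 2 == 1 else s
--                    for i, s in enumerate(segs))
-- ===== Notes on version B (the rewrite author's own statement) =====
-- stated objective: idiomatic
-- what changed: Replaced the index-based char scan with a mutable quote flag by splitting the string on the double-quote character and rewriting only the odd-indexed (inside-quotes) segments with two str.replace calls, joining on the empty string.
import Mathlib
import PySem

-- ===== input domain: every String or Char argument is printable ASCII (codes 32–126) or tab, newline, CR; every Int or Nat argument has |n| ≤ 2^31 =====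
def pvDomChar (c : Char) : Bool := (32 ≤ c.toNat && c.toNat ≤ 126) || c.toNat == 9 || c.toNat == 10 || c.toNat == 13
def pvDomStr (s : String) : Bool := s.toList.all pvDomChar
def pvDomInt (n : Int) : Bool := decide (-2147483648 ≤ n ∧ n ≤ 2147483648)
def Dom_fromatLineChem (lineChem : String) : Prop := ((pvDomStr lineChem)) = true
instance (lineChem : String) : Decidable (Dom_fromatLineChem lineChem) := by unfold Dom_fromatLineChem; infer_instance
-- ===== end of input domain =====

-- B replaces A's index-based char scan with a toggling quote flag by splitting on '"',
-- rewriting only the odd-indexed (inside-quotes) segments, and joining on "" (objective: idiomatic).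

-- ===== PORT A =====
-- the while loop over llineChem with the mutable flagopen, as structural recursion over the char list
def pvALoop : List Char → Nat → List Char
  | [], _ => []
  | c :: rest, flag =>
    let flag' := if c = '"' ∧ flag = 0 then 1
                 else if c = '"' ∧ flag = 1 then 0
                 else flag
    let c' := if flag' = 1 ∧ c = '\n' then ' '
              else if flag' = 1 ∧ c = ',' then ' '
              else c
    c' :: pvALoop rest flag'

def fromatLineChem (lineChem : String) : String :=
  PySem.Str.replace (String.ofList (pvALoop lineChem.toList 0)) "\"" ""

-- ===== PORT B =====
def fromatLineChem_alt (lineChem : String) : String :=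
  let segs := PySem.Chars.splitOn lineChem.toList ['"']
  String.ofList (PySem.Chars.join []
    ((PySem.List.enumerate segs).map (fun p =>
      if PySem.Int.mod p.1 2 = 1
      then PySem.Chars.replace (PySem.Chars.replace p.2 ['\n'] [' ']) [','] [' ']
      else p.2)))

-- ===== PRECONDITION & SPEC =====
def Spec_fromatLineChem (lineChem : String) (out : String) : Prop := out = fromatLineChem_alt lineChem
instance (lineChem : String) (out : String) : Decidable (Spec_fromatLineChem lineChem out) := by unfold Spec_fromatLineChem; infer_instance

-- ===== CLAIM (what is proved, stated in full; the proofs are below) =====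
def Claim_equal_fromatLineChem : Prop := ∀ (lineChem : String), Dom_fromatLineChem lineChem → Spec_fromatLineChem lineChem (fromatLineChem lineChem)

-- ===== LEMMAS AND PROOFS =====

-- proof-side mirror of split-on-one-char
def pvSplit (q : Char) : List Char → List (List Char)
  | [] => [[]]
  | c :: cs => if c = q then [] :: pvSplit q cs else (pvSplit q cs).modifyHead (c :: ·)

lemma pvSplit_ne_nil (q : Char) (cs : List Char) : pvSplit q cs ≠ [] := by
  induction cs with
  | nil => simp [pvSplit]
  | cons c cs ih =>
    simp only [pvSplit]
    split
    · simp
    · cases hs : pvSplit q cs with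
      | nil => exact absurd hs ih
      | cons s ss => simp [List.modifyHead]

lemma splitOn_go_eq (q : Char) (l cur : List Char) (accs : List (List Char))
    (fuel : Nat) (h : l.length ≤ fuel) :
    PySem.Chars.splitOn.go [q] fuel l cur (accs) =
      accs.reverse ++ (pvSplit q l).modifyHead (cur.reverse ++ ·) := by
  induction fuel generalizing l cur accs with
  | zero =>
    have : l = [] := by cases l <;> simp_all
    subst this
    simp [PySem.Chars.splitOn.go, pvSplit]
  | succ fuel ih =>
    cases l with
    | nil => simp [PySem.Chars.splitOn.go, pvSplit]
    | cons c rest =>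
      simp only [PySem.Chars.splitOn.go]
      by_cases hc : c = q
      · subst hc
        have hp : List.isPrefixOf [c] (c :: rest) = true := by simp [List.isPrefixOf]
        rw [if_pos hp]
        simp only [List.length_cons] at h
        simp only [List.length_cons, List.length_nil, Nat.zero_add, List.drop_succ_cons, List.drop_zero]
        rw [ih rest [] _ (by omega)]
        have hne := pvSplit_ne_nil c rest
        cases hs : pvSplit c rest with
        | nil => exact absurd hs hne
        | cons s ss => simp [pvSplit, hs, List.modifyHead]
      · have hp : List.isPrefixOf [q] (c :: rest) = false := by
          simp [List.isPrefixOf]; exact fun h' => absurd h'.symm hc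
        rw [if_neg (by simp [hp])]
        simp only [List.length_cons] at h
        rw [ih rest (c :: cur) accs (by omega)]
        have hne := pvSplit_ne_nil q rest
        cases hs : pvSplit q rest with
        | nil => exact absurd hs hne
        | cons s ss => simp [pvSplit, hs, hc, List.modifyHead]

lemma splitOn_eq_pvSplit (q : Char) (cs : List Char) :
    PySem.Chars.splitOn cs [q] = pvSplit q cs := by
  simp only [PySem.Chars.splitOn]
  rw [splitOn_go_eq q cs [] [] (cs.length + 1) (by omega)]
  have hne := pvSplit_ne_nil q cs
  cases hs : pvSplit q cs with
  | nil => exact absurd hs hne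
  | cons s ss => simp [List.modifyHead]

-- single-char replace is a flatMap over the chars
lemma replace_go_eq (x : Char) (new : List Char) (l acc : List Char)
    (fuel : Nat) (h : l.length ≤ fuel) :
    PySem.Chars.replace.go [x] new fuel l acc =
      acc.reverse ++ l.flatMap (fun c => if c = x then new else [c]) := by
  induction fuel generalizing l acc with
  | zero =>
    have : l = [] := by cases l <;> simp_all
    subst this
    simp [PySem.Chars.replace.go]
  | succ fuel ih =>
    cases l with
    | nil => simp [PySem.Chars.replace.go]
    | cons c rest =>
      simp only [PySem.Chars.replace.go]
      simp only [List.length_cons] at h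
      by_cases hc : c = x
      · subst hc
        have hp : List.isPrefixOf [c] (c :: rest) = true := by simp [List.isPrefixOf]
        rw [if_pos hp]
        simp only [List.length_cons, List.length_nil, Nat.zero_add, List.drop_succ_cons, List.drop_zero]
        rw [ih rest (new.reverse ++ acc) (by omega)]
        simp
      · have hp : List.isPrefixOf [x] (c :: rest) = false := by
          simp [List.isPrefixOf]; exact fun h' => absurd h'.symm hc
        rw [if_neg (by simp [hp])]
        rw [ih rest (c :: acc) (by omega)]
        simp [hc]

lemma replace_single (x : Char) (new l : List Char) :
    PySem.Chars.replace l [x] new = l.flatMap (fun c => if c = x then new else [c]) := by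
  simp only [PySem.Chars.replace, List.isEmpty]
  rw [replace_go_eq x new l [] l.length (le_refl _)]
  simp

-- B's inner substitution, charwise
def pvSub (c : Char) : Char := if c = '\n' then ' ' else if c = ',' then ' ' else c

lemma replace_pair_eq_map (s : List Char) :
    PySem.Chars.replace (PySem.Chars.replace s ['\n'] [' ']) [','] [' '] = s.map pvSub := by
  rw [replace_single, replace_single]
  induction s with
  | nil => simp
  | cons c cs ih =>
    by_cases h1 : c = '\n'
    · subst h1; simpa [pvSub] using ih
    · by_cases h2 : c = ','
      · subst h2; simpa [pvSub] using ih
      · simpa [pvSub, h1, h2] using ih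

-- alternating per-segment transform, starting from a given parity
def pvAlt (inside : Bool) : List (List Char) → List (List Char)
  | [] => []
  | s :: ss => (if inside then s.map pvSub else s) :: pvAlt (!inside) ss

-- B's enumerate/mod formulation is pvAlt keyed on the start index's parity
lemma enumerate_map_eq_pvAlt (segs : List (List Char)) (n : Nat) :
    (PySem.List.enumerate segs (n : Int)).map (fun p =>
        if PySem.Int.mod p.1 2 = 1
        then PySem.Chars.replace (PySem.Chars.replace p.2 ['\n'] [' ']) [','] [' ']
        else p.2) =
      pvAlt (n % 2 = 1) segs := by
  induction segs generalizing n with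
  | nil => simp [PySem.List.enumerate_nil, pvAlt]
  | cons s ss ih =>
    rw [PySem.List.enumerate_cons]
    have hm : PySem.Int.mod (n : Int) 2 = ((n % 2 : Nat) : Int) := PySem.Int.mod_natCast n 2
    have hsucc : ((n : Int) + 1) = ((n + 1 : Nat) : Int) := by push_cast; ring
    simp only [List.map_cons, hm, hsucc, ih (n + 1), pvAlt]
    congr 1
    · by_cases h : n % 2 = 1
      · simp [h, replace_pair_eq_map]
      · have h2 : ¬ (((n % 2 : Nat) : Int) = 1) := by omega
        rw [if_neg h2, if_neg (by simpa using h)]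
    · congr 1
      rcases Nat.even_or_odd n with he | ho
      · have h0 : n % 2 = 0 := Nat.even_iff.mp he
        have h1 : (n + 1) % 2 = 1 := by omega
        simp [h0, h1]
      · have h1 : n % 2 = 1 := Nat.odd_iff.mp ho
        have h0 : (n + 1) % 2 = 0 := by omega
        simp [h0, h1]

-- the core correspondence: A's flagged scan, with quotes removed, is the flattened pvAlt of pvSplit
lemma key (cs : List Char) (flag : Nat) (hf : flag = 0 ∨ flag = 1) :
    (pvALoop cs flag).flatMap (fun c => if c = '"' then [] else [c]) =
      (pvAlt (flag = 1) (pvSplit '"' cs)).flatten := by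
  induction cs generalizing flag with
  | nil =>
    rcases hf with h | h <;> subst h <;> simp [pvALoop, pvSplit, pvAlt]
  | cons c rest ih =>
    by_cases hc : c = '"'
    · subst hc
      rcases hf with h | h <;> subst h
      · -- flag 0 → 1, char is the quote itself (dropped)
        have : pvALoop ('"' :: rest) 0 = '"' :: pvALoop rest 1 := by
          simp [pvALoop]
        rw [this]
        simp only [List.flatMap_cons]
        rw [ih 1 (Or.inr rfl)]
        simp [pvSplit, pvAlt]
      · -- flag 1 → 0
        have : pvALoop ('"' :: rest) 1 = '"' :: pvALoop rest 0 := by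
          simp [pvALoop]
        rw [this]
        simp only [List.flatMap_cons]
        rw [ih 0 (Or.inl rfl)]
        simp [pvSplit, pvAlt]
    · -- ordinary char: flag unchanged, char kept (possibly substituted when inside)
      have hstep : pvALoop (c :: rest) flag =
          (if flag = 1 then pvSub c else c) :: pvALoop rest flag := by
        rcases hf with h | h <;> subst h <;> simp [pvALoop, pvSub, hc]
      rw [hstep]
      have hkeep : (if flag = 1 then pvSub c else c) ≠ '"' := by
        split_ifs with h
        · simp only [pvSub]; split_ifs <;> simp_all
        · exact hc
      simp only [List.flatMap_cons, if_neg hkeep]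
      rw [ih flag hf]
      have hne := pvSplit_ne_nil '"' rest
      cases hs : pvSplit '"' rest with
      | nil => exact absurd hs hne
      | cons s ss =>
        simp only [pvSplit, if_neg hc, hs, List.modifyHead, pvAlt]
        by_cases h1 : flag = 1 <;> simp [h1, List.flatten_cons]

lemma join_nil_eq_flatten (parts : List (List Char)) :
    PySem.Chars.join [] parts = parts.flatten := by
  simp only [PySem.Chars.join]
  induction parts with
  | nil => simp [List.intercalate, List.intersperse]
  | cons p ps ih =>
    cases ps with
    | nil => simp [List.intercalate, List.intersperse]
    | cons q qs =>
      simp only [List.intercalate, List.intersperse, List.flatten_cons] at *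
      simpa using ih

-- ===== VERDICT (by name: the statement is the Claim_ definition above) =====
theorem fromatLineChem_spec : Claim_equal_fromatLineChem := by
  intro lineChem _
  show fromatLineChem lineChem = fromatLineChem_alt lineChem
  unfold fromatLineChem fromatLineChem_alt
  apply String.toList_injective
  rw [PySem.Str.toList_replace]
  simp only [String.toList_ofList]
  rw [show ("\"" : String).toList = ['"'] from rfl, show ("" : String).toList = ([] : List Char) from rfl]
  rw [replace_single]
  rw [splitOn_eq_pvSplit]
  rw [join_nil_eq_flatten]
  have h := enumerate_map_eq_pvAlt (pvSplit '"' lineChem.toList) 0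
  simp only [Nat.cast_zero] at h
  rw [h]
  have hkey := key lineChem.toList 0 (Or.inl rfl)
  simpa using hkey
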